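-- pv_equiv track=rewrite | github.com/kevinnbass/ai_detector | src/core/detection/optimized_detector.py | _group_texts_by_length
-- ===== SOURCE A (Python) =====
-- from typing import Dict, Any, List, Optional, Union
--
-- def _group_texts_by_length(texts: List[str]) -> Dict[str, List[str]]:
--     """Group texts by length for batch optimization."""
--     groups = {
--         "short": [],    # < 100 chars
--         "medium": [],   # 100-500 chars
--         "long": [],     # 500-2000 chars
--         "very_long": [] # > 2000 chars
--     }
--
--     for text in texts:
--         length = len(text)
--         if length < 100:
--             groups["short"].append(text)
--         elif length < 500:
--             groups["medium"].append(text)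
--         elif length < 2000:
--             groups["long"].append(text)
--         else:
--             groups["very_long"].append(text)
--
--     return groups
-- ===== SOURCE B (Python) =====
-- BOUNDS = (100, 500, 2000)
-- NAMES = ("short", "medium", "long", "very_long")
--
-- def _group_texts_by_length(texts):
--     """Group texts by length for batch optimization (threshold-table version)."""
--     return {
--         name: [t for t in texts if sum(b <= len(t) for b in BOUNDS) == i]
--         for i, name in enumerate(NAMES)
--     }
-- ===== Notes on version B (the rewrite author's own statement) =====
-- stated objective: alternative
-- what changed: Replaced the single accumulating pass with an if/elif cascade appending into a mutable dict by a threshold-table classification (bucket index = number of bounds <= len) and one independent filter comprehension per bucket.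
import Mathlib
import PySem

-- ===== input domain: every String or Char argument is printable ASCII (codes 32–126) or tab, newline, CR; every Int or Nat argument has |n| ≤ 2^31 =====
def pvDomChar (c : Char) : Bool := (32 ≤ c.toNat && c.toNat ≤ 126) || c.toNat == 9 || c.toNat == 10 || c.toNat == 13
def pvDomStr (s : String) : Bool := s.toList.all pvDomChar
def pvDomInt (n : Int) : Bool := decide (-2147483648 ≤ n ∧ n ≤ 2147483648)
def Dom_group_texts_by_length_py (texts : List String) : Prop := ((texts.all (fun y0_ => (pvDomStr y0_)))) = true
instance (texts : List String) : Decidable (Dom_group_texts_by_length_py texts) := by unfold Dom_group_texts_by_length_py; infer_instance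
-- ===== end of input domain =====

-- ===== PORT A =====
-- One honest line: B classifies each text by a threshold table (bucket index = count of bounds ≤ len)
-- and builds each bucket as an independent filter, instead of A's single accumulating pass with an
-- if/elif cascade into a mutable dict; an alternative decomposition, not claimed faster.
def group_texts_by_length_py (texts : List String) : List (String × List String) :=
  (texts.foldl (fun groups text =>
      let length := PySem.Str.len text
      if length < 100 then groups.modify "short" [] (fun l => l ++ [text])
      else if length < 500 then groups.modify "medium" [] (fun l => l ++ [text])
      else if length < 2000 then groups.modify "long" [] (fun l => l ++ [text])
      else groups.modify "very_long" [] (fun l => l ++ [text]))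
    (PySem.Dict.mk [("short", []), ("medium", []), ("long", []), ("very_long", [])])).items

-- ===== PORT B =====
def pvBounds : List Int := [100, 500, 2000]

def pvIdx (n : Int) : Int :=
  (pvBounds.map (fun b => if b ≤ n then (1 : Int) else 0)).sum

def group_texts_by_length_py_alt (texts : List String) : List (String × List String) :=
  (PySem.List.enumerate ["short", "medium", "long", "very_long"]).map
    (fun p => (p.2, texts.filter (fun t => pvIdx (PySem.Str.len t) == p.1)))

-- ===== PRECONDITION & SPEC =====
def Spec_group_texts_by_length_py (texts : List String) (out : List (String × List String)) : Prop := out = group_texts_by_length_py_alt texts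
instance (texts : List String) (out : List (String × List String)) : Decidable (Spec_group_texts_by_length_py texts out) := by unfold Spec_group_texts_by_length_py; infer_instance

-- ===== CLAIM (what is proved, stated in full; the proofs are below) =====
def Claim_equal_group_texts_by_length_py : Prop := ∀ (texts : List String), Dom_group_texts_by_length_py texts → Spec_group_texts_by_length_py texts (group_texts_by_length_py texts)

-- ===== LEMMAS AND PROOFS =====

-- characterisation of the threshold-table index on the four length ranges
lemma pvIdx_lt_100 (n : Int) (h : n < 100) : pvIdx n = 0 := by
  simp only [pvIdx, pvBounds, List.map, List.sum_cons, List.sum_nil]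
  split_ifs <;> omega

lemma pvIdx_lt_500 (n : Int) (h1 : ¬ n < 100) (h2 : n < 500) : pvIdx n = 1 := by
  simp only [pvIdx, pvBounds, List.map, List.sum_cons, List.sum_nil]
  split_ifs <;> omega

lemma pvIdx_lt_2000 (n : Int) (h2 : ¬ n < 500) (h3 : n < 2000) : pvIdx n = 2 := by
  simp only [pvIdx, pvBounds, List.map, List.sum_cons, List.sum_nil]
  split_ifs <;> omega

lemma pvIdx_ge_2000 (n : Int) (h3 : ¬ n < 2000) : pvIdx n = 3 := by
  simp only [pvIdx, pvBounds, List.map, List.sum_cons, List.sum_nil]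
  split_ifs <;> omega

-- one step of A's loop on the literal four-key dict, per key
lemma gtbl_modify_short (s m l v : List String) (f : List String → List String) :
    (PySem.Dict.mk [("short", s), ("medium", m), ("long", l), ("very_long", v)]).modify "short" [] f
    = PySem.Dict.mk [("short", f s), ("medium", m), ("long", l), ("very_long", v)] := rfl

lemma gtbl_modify_medium (s m l v : List String) (f : List String → List String) :
    (PySem.Dict.mk [("short", s), ("medium", m), ("long", l), ("very_long", v)]).modify "medium" [] f
    = PySem.Dict.mk [("short", s), ("medium", f m), ("long", l), ("very_long", v)] := rfl

lemma gtbl_modify_long (s m l v : List String) (f : List String → List String) :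
    (PySem.Dict.mk [("short", s), ("medium", m), ("long", l), ("very_long", v)]).modify "long" [] f
    = PySem.Dict.mk [("short", s), ("medium", m), ("long", f l), ("very_long", v)] := rfl

lemma gtbl_modify_very_long (s m l v : List String) (f : List String → List String) :
    (PySem.Dict.mk [("short", s), ("medium", m), ("long", l), ("very_long", v)]).modify "very_long" [] f
    = PySem.Dict.mk [("short", s), ("medium", m), ("long", l), ("very_long", f v)] := rfl

-- loop invariant: A's fold from the literal dict with accumulators s m l v yields the filters appended
lemma gtbl_loop (ts : List String) (s m l v : List String) :
    (ts.foldl (fun groups text =>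
      let length := PySem.Str.len text
      if length < 100 then groups.modify "short" [] (fun l => l ++ [text])
      else if length < 500 then groups.modify "medium" [] (fun l => l ++ [text])
      else if length < 2000 then groups.modify "long" [] (fun l => l ++ [text])
      else groups.modify "very_long" [] (fun l => l ++ [text]))
      (PySem.Dict.mk [("short", s), ("medium", m), ("long", l), ("very_long", v)])).items
    = [("short", s ++ ts.filter (fun t => pvIdx (PySem.Str.len t) == 0)),
       ("medium", m ++ ts.filter (fun t => pvIdx (PySem.Str.len t) == 1)),
       ("long", l ++ ts.filter (fun t => pvIdx (PySem.Str.len t) == 2)),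
       ("very_long", v ++ ts.filter (fun t => pvIdx (PySem.Str.len t) == 3))] := by
  induction ts generalizing s m l v with
  | nil => simp
  | cons t ts ih =>
    simp only [List.foldl_cons, List.filter_cons]
    by_cases h1 : PySem.Str.len t < 100
    · rw [if_pos h1, gtbl_modify_short, ih]
      have h0 := pvIdx_lt_100 _ h1
      rw [PySem.Str.len_eq] at h0; simp only [String.length_toList] at h0
      simp [h0, List.append_assoc]
    · rw [if_neg h1]
      by_cases h2 : PySem.Str.len t < 500
      · rw [if_pos h2, gtbl_modify_medium, ih]
        have h0 := pvIdx_lt_500 _ h1 h2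
        rw [PySem.Str.len_eq] at h0; simp only [String.length_toList] at h0
        simp [h0, List.append_assoc]
      · rw [if_neg h2]
        by_cases h3 : PySem.Str.len t < 2000
        · rw [if_pos h3, gtbl_modify_long, ih]
          have h0 := pvIdx_lt_2000 _ h2 h3
          rw [PySem.Str.len_eq] at h0; simp only [String.length_toList] at h0
          simp [h0, List.append_assoc]
        · rw [if_neg h3, gtbl_modify_very_long, ih]
          have h0 := pvIdx_ge_2000 _ h3
          rw [PySem.Str.len_eq] at h0; simp only [String.length_toList] at h0
          simp [h0, List.append_assoc]

-- ===== VERDICT (by name: the statement is the Claim_ definition above) =====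
theorem group_texts_by_length_py_spec : Claim_equal_group_texts_by_length_py := by
  intro texts _
  show group_texts_by_length_py texts = group_texts_by_length_py_alt texts
  rw [group_texts_by_length_py, gtbl_loop texts [] [] [] []]
  simp [group_texts_by_length_py_alt, PySem.List.enumerate]
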